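-- pv_equiv track=rewrite | github.com/fonsi16/IA_Fig_UMA | jogo.py | conta_menos
-- ===== SOURCE A (Python) =====
-- def conta_menos(num_total):
--     res=[]
--     while 1:
--         # Se o numero total de peças for maior ou igual a 3, adiciona 3 ao array de figuras e subtrai 3 ao numero total de peças
--         if num_total>=3:
--             res.append(3)
--             num_total=num_total-3
--         # Se não for possível fazer o menos mais maior
--         else:
--             # Se o numero total de peças for igual a 2, adiciona 2 ao array de figuras e acaba a função
--             if num_total==2:
--                 res.append(2)
--             break
--
--     return res
-- ===== SOURCE B (Python) =====
-- def conta_menos(num_total):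
--     res = [3] * (num_total // 3)
--     if num_total >= 2 and num_total % 3 == 2:
--         res.append(2)
--     return res
-- ===== Notes on version B (the rewrite author's own statement) =====
-- stated objective: simpler
-- what changed: Replaces the subtract-3 while-loop with a closed-form construction: a replicated list of threes of length num_total//3, plus a trailing two exactly when the remainder condition holds.
import Mathlib
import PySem

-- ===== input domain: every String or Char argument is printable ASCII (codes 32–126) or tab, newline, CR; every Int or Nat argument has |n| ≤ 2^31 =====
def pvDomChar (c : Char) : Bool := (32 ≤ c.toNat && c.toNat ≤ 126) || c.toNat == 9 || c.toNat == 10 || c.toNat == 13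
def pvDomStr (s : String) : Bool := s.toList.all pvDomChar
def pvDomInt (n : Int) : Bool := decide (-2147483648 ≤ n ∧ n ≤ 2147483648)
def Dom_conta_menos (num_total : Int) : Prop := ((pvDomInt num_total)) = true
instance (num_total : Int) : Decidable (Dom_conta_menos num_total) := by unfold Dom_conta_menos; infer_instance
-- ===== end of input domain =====

-- ===== PORT A =====
-- while 1: if num_total>=3: res.append(3); num_total-=3 else: (if ==2 append 2); break
def conta_menos (num_total : Int) : List Int :=
  if num_total ≥ 3 then 3 :: conta_menos (num_total - 3)
  else if num_total = 2 then [2] else []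
termination_by num_total.toNat
decreasing_by omega

-- ===== PORT B =====
-- res = [3] * (num_total // 3); append 2 when num_total >= 2 and num_total % 3 == 2
def conta_menos_alt (num_total : Int) : List Int :=
  List.replicate (PySem.Int.floordiv num_total 3).toNat 3 ++
    (if num_total ≥ 2 ∧ PySem.Int.mod num_total 3 = 2 then [2] else [])

-- ===== PRECONDITION & SPEC =====
def Spec_conta_menos (num_total : Int) (out : List Int) : Prop := out = conta_menos_alt num_total
instance (num_total : Int) (out : List Int) : Decidable (Spec_conta_menos num_total out) := by unfold Spec_conta_menos; infer_instance

-- ===== CLAIM (what is proved, stated in full; the proofs are below) =====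
def Claim_equal_conta_menos : Prop := ∀ (num_total : Int), Dom_conta_menos num_total → Spec_conta_menos num_total (conta_menos num_total)

-- ===== LEMMAS AND PROOFS =====

-- ===== VERDICT (by name: the statement is the Claim_ definition above) =====
theorem alt_step (n : Int) (h : n ≥ 3) :
    conta_menos_alt n = 3 :: conta_menos_alt (n - 3) := by
  have h3 : (0:Int) < 3 := by norm_num
  unfold conta_menos_alt
  rw [PySem.Int.floordiv_eq_ediv_of_pos h3, PySem.Int.floordiv_eq_ediv_of_pos h3,
      PySem.Int.mod_eq_emod_of_pos h3, PySem.Int.mod_eq_emod_of_pos h3]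
  have hq : n / 3 = (n - 3) / 3 + 1 := by omega
  have hm : n % 3 = (n - 3) % 3 := by omega
  have hqn : (0:Int) ≤ (n - 3) / 3 := Int.ediv_nonneg (by omega) (by norm_num)
  have ht : (n / 3).toNat = ((n - 3) / 3).toNat + 1 := by omega
  rw [ht, List.replicate_succ, hm]
  have hcond : (n ≥ 2 ∧ n % 3 = 2) ↔ (n - 3 ≥ 2 ∧ (n - 3) % 3 = 2) := by omega
  simp only [hm] at hcond
  by_cases hc : n - 3 ≥ 2 ∧ (n - 3) % 3 = 2
  · rw [if_pos (hcond.mpr hc), if_pos hc]; simp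
  · rw [if_neg (fun h' => hc (hcond.mp h')), if_neg hc]; simp

theorem conta_menos_eq (n : Int) : conta_menos n = conta_menos_alt n := by
  by_cases h : n ≥ 3
  · have : (n - 3).toNat < n.toNat := by omega
    rw [conta_menos, if_pos h, alt_step n h, conta_menos_eq (n - 3)]
  · rw [conta_menos, if_neg h]
    have h3 : (0:Int) < 3 := by norm_num
    unfold conta_menos_alt
    rw [PySem.Int.floordiv_eq_ediv_of_pos h3, PySem.Int.mod_eq_emod_of_pos h3]
    by_cases h2 : n = 2
    · subst h2; decide
    · rw [if_neg h2]
      have hq : (n / 3).toNat = 0 := by omega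
      have hc : ¬ (n ≥ 2 ∧ n % 3 = 2) := by omega
      rw [hq, if_neg hc]; simp
termination_by n.toNat
decreasing_by omega

theorem conta_menos_spec : Claim_equal_conta_menos := by
  intro n _
  unfold Spec_conta_menos
  exact conta_menos_eq n
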